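-- pv_equiv track=rewrite | github.com/comersaglam/Competitive_Programming_COS | Inzva_SP_Pr/week3/springe.py | bfs
-- ===== SOURCE A (Python) =====
-- from collections import deque
--
-- def bfs(start, table):
--     count = 0
--     queue = deque([(start, 0)])
--
--     while queue:
--         (x, y), depth = queue.popleft()
--
--         if depth == 3:
--             if table[x][y] == 2:
--                 count += 1
--             continue
--
--         for dx, dy in [(-1, 0), (1, 0), (0, -1), (0, 1)]:
--             nx, ny = x + dx, y + dy
--             if depth == 0 and table[nx][ny] == 2:
--                 queue.append(((nx, ny), depth + 1))
--             elif depth == 1 and table[nx][ny] == 0: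
--                 queue.append(((nx, ny), depth + 1))
--             elif depth == 2 and table[nx][ny] == 2:
--                 queue.append(((nx, ny), depth + 1))
--
--     return count
-- ===== SOURCE B (Python) =====
-- def bfs(start, table):
--     x, y = start
--     dirs = [(-1, 0), (1, 0), (0, -1), (0, 1)]
--     count = 0
--     for d1x, d1y in dirs:
--         ax, ay = x + d1x, y + d1y
--         if table[ax][ay] != 2:
--             continue
--         for d2x, d2y in dirs:
--             bx, by = ax + d2x, ay + d2y
--             if table[bx][by] != 0:
--                 continue
--             for d3x, d3y in dirs:
--                 cx, cy = bx + d3x, by + d3y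
--                 if table[cx][cy] == 2:
--                     count += 1
--     return count
-- ===== Notes on version B (the rewrite author's own statement) =====
-- stated objective: simpler
-- what changed: Replaces the deque-based BFS over (cell, depth) states with three fixed nested loops over the four direction offsets, matching values 2, 0, 2 per level and dropping the queue and the redundant depth-3 recheck.
import Mathlib
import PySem

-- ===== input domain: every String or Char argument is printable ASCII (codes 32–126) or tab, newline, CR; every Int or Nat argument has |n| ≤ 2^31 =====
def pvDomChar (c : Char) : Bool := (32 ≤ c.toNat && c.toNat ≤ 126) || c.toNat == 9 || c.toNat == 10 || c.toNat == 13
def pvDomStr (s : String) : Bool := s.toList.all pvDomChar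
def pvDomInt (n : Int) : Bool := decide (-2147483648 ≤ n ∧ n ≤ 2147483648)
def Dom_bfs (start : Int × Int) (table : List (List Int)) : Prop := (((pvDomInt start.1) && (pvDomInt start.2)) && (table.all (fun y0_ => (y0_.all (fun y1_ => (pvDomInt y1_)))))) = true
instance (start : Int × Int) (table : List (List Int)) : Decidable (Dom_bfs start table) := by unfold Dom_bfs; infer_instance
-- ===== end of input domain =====

-- B replaces A's deque BFS by three fixed nested direction loops (objective: simpler).

-- ===== PORT A =====
-- the direction list [(-1,0),(1,0),(0,-1),(0,1)] shared by both Pythons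
def pvDirs : List (Int × Int) := [(-1, 0), (1, 0), (0, -1), (0, 1)]

-- table[x][y] as an Option (none = IndexError; negative indices wrap, as in Python)
def pvVal? (table : List (List Int)) (x y : Int) : Option Int :=
  (PySem.List.pyGet? table x).bind (fun row => PySem.List.pyGet? row y)

-- the while-queue loop of A; the queue is a FIFO list of ((x,y), depth).
-- fuel only makes the recursion total: at most 85 entries are ever popped,
-- so fuel 100 is never exhausted (proved below via a weight measure).
def bfsLoop (table : List (List Int)) : Nat → List ((Int × Int) × Int) → Int → Int
  | 0, _, count => count
  | _ + 1, [], count => count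
  | fuel + 1, ((x, y), depth) :: rest, count =>
    if depth == 3 then
      if pvVal? table x y == some 2 then bfsLoop table fuel rest (count + 1)
      else bfsLoop table fuel rest count
    else
      let queue' := pvDirs.foldl (fun acc d =>
        let nx := x + d.1
        let ny := y + d.2
        if depth == 0 && (pvVal? table nx ny == some 2) then acc ++ [((nx, ny), depth + 1)]
        else if depth == 1 && (pvVal? table nx ny == some 0) then acc ++ [((nx, ny), depth + 1)]
        else if depth == 2 && (pvVal? table nx ny == some 2) then acc ++ [((nx, ny), depth + 1)]
        else acc) rest
      bfsLoop table fuel queue' count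

def bfs (start : Int × Int) (table : List (List Int)) : Int :=
  bfsLoop table 100 [(start, 0)] 0

-- ===== PORT B =====
def bfs_alt (start : Int × Int) (table : List (List Int)) : Int :=
  pvDirs.foldl (fun count d1 =>
    let ax := start.1 + d1.1
    let ay := start.2 + d1.2
    if pvVal? table ax ay != some 2 then count
    else pvDirs.foldl (fun count d2 =>
      let bx := ax + d2.1
      let by_ := ay + d2.2
      if pvVal? table bx by_ != some 0 then count
      else pvDirs.foldl (fun count d3 =>
        let cx := bx + d3.1
        let cy := by_ + d3.2
        if pvVal? table cx cy == some 2 then count + 1 else count) count) count) 0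

-- ===== PRECONDITION & SPEC =====
-- Pre_: exactly the inputs where A's walk never indexes out of range (A raises
-- IndexError otherwise): every cell probed along the value pattern 2,0,2 exists.
def Pre_bfs (start : Int × Int) (table : List (List Int)) : Prop :=
  ∀ d1 ∈ pvDirs,
    (pvVal? table (start.1 + d1.1) (start.2 + d1.2)).isSome ∧
    (pvVal? table (start.1 + d1.1) (start.2 + d1.2) = some 2 →
      ∀ d2 ∈ pvDirs,
        (pvVal? table (start.1 + d1.1 + d2.1) (start.2 + d1.2 + d2.2)).isSome ∧
        (pvVal? table (start.1 + d1.1 + d2.1) (start.2 + d1.2 + d2.2) = some 0 →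
          ∀ d3 ∈ pvDirs,
            (pvVal? table (start.1 + d1.1 + d2.1 + d3.1) (start.2 + d1.2 + d2.2 + d3.2)).isSome))
instance (start : Int × Int) (table : List (List Int)) : Decidable (Pre_bfs start table) := by
  unfold Pre_bfs; infer_instance

def pvWitness_bfs : (Int × Int) × List (List Int) :=
  ((2, 2), [[0,0,2,0,0],[0,2,0,2,0],[2,0,9,0,2],[0,2,0,2,0],[0,0,2,0,0]])

def Spec_bfs (start : Int × Int) (table : List (List Int)) (out : Int) : Prop := out = bfs_alt start table
instance (start : Int × Int) (table : List (List Int)) (out : Int) : Decidable (Spec_bfs start table out) := by unfold Spec_bfs; infer_instance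

-- ===== CLAIM (what is proved, stated in full; the proofs are below) =====
def Claim_equal_bfs : Prop := ∀ (start : Int × Int) (table : List (List Int)), Dom_bfs start table → Pre_bfs start table → Spec_bfs start table (bfs start table)

-- ===== LEMMAS AND PROOFS =====

-- the pattern sums level by level (depth 3, 2, 1, 0)
def pvC3 (t : List (List Int)) (p : Int × Int) : Int :=
  if pvVal? t p.1 p.2 == some 2 then 1 else 0

def pvC2 (t : List (List Int)) (p : Int × Int) : Int :=
  (pvDirs.map (fun d =>
    if pvVal? t (p.1 + d.1) (p.2 + d.2) == some 2 then pvC3 t (p.1 + d.1, p.2 + d.2) else 0)).sum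

def pvC1 (t : List (List Int)) (p : Int × Int) : Int :=
  (pvDirs.map (fun d =>
    if pvVal? t (p.1 + d.1) (p.2 + d.2) == some 0 then pvC2 t (p.1 + d.1, p.2 + d.2) else 0)).sum

def pvC0 (t : List (List Int)) (p : Int × Int) : Int :=
  (pvDirs.map (fun d =>
    if pvVal? t (p.1 + d.1) (p.2 + d.2) == some 2 then pvC1 t (p.1 + d.1, p.2 + d.2) else 0)).sum

-- contribution of one queue entry to the final count
def pvW (t : List (List Int)) (e : (Int × Int) × Int) : Int :=
  if e.2 = 3 then pvC3 t e.1
  else if e.2 = 2 then pvC2 t e.1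
  else if e.2 = 1 then pvC1 t e.1
  else if e.2 = 0 then pvC0 t e.1
  else 0

-- termination weight of one queue entry
def pvWt (e : (Int × Int) × Int) : Nat :=
  if e.2 = 3 then 1 else if e.2 = 2 then 5 else if e.2 = 1 then 21 else if e.2 = 0 then 85 else 1

-- the children generated when ((x,y),depth) is popped (depth ≠ 3)
def pvStep (t : List (List Int)) (x y depth : Int) (d : Int × Int) : List ((Int × Int) × Int) :=
  if depth == 0 && (pvVal? t (x + d.1) (y + d.2) == some 2) then [((x + d.1, y + d.2), depth + 1)]
  else if depth == 1 && (pvVal? t (x + d.1) (y + d.2) == some 0) then [((x + d.1, y + d.2), depth + 1)]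
  else if depth == 2 && (pvVal? t (x + d.1) (y + d.2) == some 2) then [((x + d.1, y + d.2), depth + 1)]
  else []

theorem pvWt_pos (e : (Int × Int) × Int) : 1 ≤ pvWt e := by
  unfold pvWt; split_ifs <;> omega

theorem pvStep_eq_foldl (t : List (List Int)) (x y depth : Int)
    (rest : List ((Int × Int) × Int)) :
    pvDirs.foldl (fun acc d =>
        let nx := x + d.1
        let ny := y + d.2
        if depth == 0 && (pvVal? t nx ny == some 2) then acc ++ [((nx, ny), depth + 1)]
        else if depth == 1 && (pvVal? t nx ny == some 0) then acc ++ [((nx, ny), depth + 1)]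
        else if depth == 2 && (pvVal? t nx ny == some 2) then acc ++ [((nx, ny), depth + 1)]
        else acc) rest
      = rest ++ pvDirs.flatMap (pvStep t x y depth) := by
  have hf : (fun (acc : List ((Int × Int) × Int)) (d : Int × Int) =>
      let nx := x + d.1
      let ny := y + d.2
      if depth == 0 && (pvVal? t nx ny == some 2) then acc ++ [((nx, ny), depth + 1)]
      else if depth == 1 && (pvVal? t nx ny == some 0) then acc ++ [((nx, ny), depth + 1)]
      else if depth == 2 && (pvVal? t nx ny == some 2) then acc ++ [((nx, ny), depth + 1)]
      else acc)
      = fun acc d => acc ++ pvStep t x y depth d := by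
    funext acc d
    simp only [pvStep]
    split_ifs <;> simp
  rw [hf, PySem.List.foldl_append_eq_flatMap]

theorem pvStep_wt (t : List (List Int)) (x y depth : Int) :
    ((pvDirs.flatMap (pvStep t x y depth)).map pvWt).sum + 1 ≤ pvWt ((x, y), depth) := by
  by_cases h0 : depth = 0
  · subst h0
    simp only [pvDirs, List.flatMap_cons, List.flatMap_nil, List.append_nil, pvStep, pvWt]
    norm_num
    split_ifs <;> simp [pvWt]
  · by_cases h1 : depth = 1
    · subst h1
      simp only [pvDirs, List.flatMap_cons, List.flatMap_nil, List.append_nil, pvStep, pvWt]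
      norm_num
      split_ifs <;> simp [pvWt]
    · by_cases h2 : depth = 2
      · subst h2
        simp only [pvDirs, List.flatMap_cons, List.flatMap_nil, List.append_nil, pvStep, pvWt]
        norm_num
        split_ifs <;> simp [pvWt]
      · have : pvDirs.flatMap (pvStep t x y depth) = [] := by
          simp [pvDirs, List.flatMap_cons, List.flatMap_nil, pvStep, h0, h1, h2]
        rw [this]
        have := pvWt_pos ((x, y), depth)
        simpa using this

theorem pvStep_w (t : List (List Int)) (x y depth : Int) (hd : depth ≠ 3) :
    ((pvDirs.flatMap (pvStep t x y depth)).map (pvW t)).sum = pvW t ((x, y), depth) := by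
  by_cases h0 : depth = 0
  · subst h0
    simp only [pvDirs, List.flatMap_cons, List.flatMap_nil, List.append_nil, pvStep, pvW, pvC0]
    norm_num
    split_ifs <;> simp [pvW, pvC1]
  · by_cases h1 : depth = 1
    · subst h1
      simp only [pvDirs, List.flatMap_cons, List.flatMap_nil, List.append_nil, pvStep, pvW, pvC1]
      norm_num
      split_ifs <;> simp [pvW, pvC2]
    · by_cases h2 : depth = 2
      · subst h2
        simp only [pvDirs, List.flatMap_cons, List.flatMap_nil, List.append_nil, pvStep, pvW, pvC2]
        norm_num
        split_ifs <;> simp [pvW, pvC3]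
      · have he : pvDirs.flatMap (pvStep t x y depth) = [] := by
          simp [pvDirs, List.flatMap_cons, List.flatMap_nil, pvStep, h0, h1, h2]
        rw [he]
        simp [pvW, h0, h1, h2, hd]

theorem bfsLoop_eq (t : List (List Int)) :
    ∀ (fuel : Nat) (q : List ((Int × Int) × Int)) (count : Int),
      (q.map pvWt).sum ≤ fuel →
      bfsLoop t fuel q count = count + (q.map (pvW t)).sum := by
  intro fuel
  induction fuel with
  | zero =>
    intro q count h
    match q with
    | [] => simp [bfsLoop]
    | e :: q' =>
      exfalso
      have h1 := pvWt_pos e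
      simp only [List.map_cons, List.sum_cons] at h
      omega
  | succ n ih =>
    intro q count h
    match q with
    | [] => simp [bfsLoop]
    | ((x, y), depth) :: rest =>
      simp only [List.map_cons, List.sum_cons] at h
      by_cases h3 : depth = 3
      · subst h3
        simp only [bfsLoop, beq_self_eq_true, if_true]
        have hw : (rest.map pvWt).sum ≤ n := by
          simp only [pvWt] at h; norm_num at h; omega
        by_cases hv : pvVal? t x y = some 2
        · rw [if_pos (by simp [hv]), ih rest (count + 1) hw]
          have h1 : pvW t ((x, y), 3) = 1 := by simp [pvW, pvC3, hv]
          simp only [List.map_cons, List.sum_cons, h1]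
          ring
        · rw [if_neg (by simp [hv]), ih rest count hw]
          have h1 : pvW t ((x, y), 3) = 0 := by simp [pvW, pvC3, hv]
          simp only [List.map_cons, List.sum_cons, h1]
          ring
      · have hne : (depth == 3) = false := by simp [h3]
        simp only [bfsLoop, hne, Bool.false_eq_true, if_false]
        rw [pvStep_eq_foldl]
        have hwt := pvStep_wt t x y depth
        have hq : ((rest ++ pvDirs.flatMap (pvStep t x y depth)).map pvWt).sum ≤ n := by
          rw [List.map_append, List.sum_append]
          omega
        rw [ih _ count hq, List.map_append, List.sum_append, pvStep_w t x y depth h3]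
        simp only [List.map_cons, List.sum_cons]
        ring

theorem pvNe_triv (a b : Option Int) : (a != b) = !(a == b) := rfl

theorem alt_eq_c0 (start : Int × Int) (t : List (List Int)) :
    bfs_alt start t = pvC0 t start := by
  have inner3 : ∀ (bx by_ : Int) (c : Int),
      pvDirs.foldl (fun count d3 =>
        if pvVal? t (bx + d3.1) (by_ + d3.2) == some 2 then count + 1 else count) c
      = c + (pvDirs.map (fun d3 =>
        if pvVal? t (bx + d3.1) (by_ + d3.2) == some 2 then (1 : Int) else 0)).sum := by
    intro bx by_ c
    have hf : (fun (count : Int) (d3 : Int × Int) =>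
        if pvVal? t (bx + d3.1) (by_ + d3.2) == some 2 then count + 1 else count)
        = fun count d3 => count + (if pvVal? t (bx + d3.1) (by_ + d3.2) == some 2 then (1 : Int) else 0) := by
      funext count d3; split_ifs <;> ring
    rw [hf, PySem.List.foldl_add]
  have c2eq : ∀ (bx by_ : Int),
      (pvDirs.map (fun d3 =>
        if pvVal? t (bx + d3.1) (by_ + d3.2) == some 2 then (1 : Int) else 0)).sum
      = pvC2 t (bx, by_) := by
    intro bx by_
    simp only [pvC2, pvC3, pvDirs, List.map, List.sum_cons, List.sum_nil]
    norm_num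
    split_ifs <;> norm_num
  have inner2 : ∀ (ax ay : Int) (c : Int),
      pvDirs.foldl (fun count d2 =>
        if pvVal? t (ax + d2.1) (ay + d2.2) != some 0 then count
        else pvDirs.foldl (fun count d3 =>
          if pvVal? t (ax + d2.1 + d3.1) (ay + d2.2 + d3.2) == some 2 then count + 1 else count) count) c
      = c + pvC1 t (ax, ay) := by
    intro ax ay c
    have hf : (fun (count : Int) (d2 : Int × Int) =>
        if pvVal? t (ax + d2.1) (ay + d2.2) != some 0 then count
        else pvDirs.foldl (fun count d3 =>
          if pvVal? t (ax + d2.1 + d3.1) (ay + d2.2 + d3.2) == some 2 then count + 1 else count) count)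
        = fun count d2 => count + (if pvVal? t (ax + d2.1) (ay + d2.2) == some 0
            then pvC2 t (ax + d2.1, ay + d2.2) else 0) := by
      funext count d2
      rw [pvNe_triv]
      by_cases hv : (pvVal? t (ax + d2.1) (ay + d2.2) == some 0) = true
      · rw [hv]
        simp only [Bool.not_true, Bool.false_eq_true, if_false]
        rw [inner3, c2eq]
        simp
      · have hv' : (pvVal? t (ax + d2.1) (ay + d2.2) == some 0) = false := by
          simpa using hv
        simp [hv']
    rw [hf, PySem.List.foldl_add, pvC1]
  have hf1 : (fun (count : Int) (d1 : Int × Int) =>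
      if pvVal? t (start.1 + d1.1) (start.2 + d1.2) != some 2 then count
      else pvDirs.foldl (fun count d2 =>
        if pvVal? t (start.1 + d1.1 + d2.1) (start.2 + d1.2 + d2.2) != some 0 then count
        else pvDirs.foldl (fun count d3 =>
          if pvVal? t (start.1 + d1.1 + d2.1 + d3.1) (start.2 + d1.2 + d2.2 + d3.2) == some 2
          then count + 1 else count) count) count)
      = fun count d1 => count + (if pvVal? t (start.1 + d1.1) (start.2 + d1.2) == some 2
          then pvC1 t (start.1 + d1.1, start.2 + d1.2) else 0) := by
    funext count d1
    rw [pvNe_triv]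
    by_cases hv : (pvVal? t (start.1 + d1.1) (start.2 + d1.2) == some 2) = true
    · rw [hv]
      simp only [Bool.not_true, Bool.false_eq_true, if_false]
      rw [inner2]
      simp
    · have hv' : (pvVal? t (start.1 + d1.1) (start.2 + d1.2) == some 2) = false := by
        simpa using hv
      simp [hv']
  have key : pvDirs.foldl (fun (count : Int) (d1 : Int × Int) =>
      if pvVal? t (start.1 + d1.1) (start.2 + d1.2) != some 2 then count
      else pvDirs.foldl (fun count d2 =>
        if pvVal? t (start.1 + d1.1 + d2.1) (start.2 + d1.2 + d2.2) != some 0 then count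
        else pvDirs.foldl (fun count d3 =>
          if pvVal? t (start.1 + d1.1 + d2.1 + d3.1) (start.2 + d1.2 + d2.2 + d3.2) == some 2
          then count + 1 else count) count) count) 0 = pvC0 t start := by
    rw [hf1, PySem.List.foldl_add]
    simp only [pvC0]
    ring
  exact key

-- ===== VERDICT (by name: the statement is the Claim_ definition above) =====
theorem bfs_spec : Claim_equal_bfs := by
  intro start table _ _
  unfold Spec_bfs bfs
  rw [bfsLoop_eq table 100 [(start, 0)] 0 (by simp [pvWt]), alt_eq_c0]
  simp [pvW]
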